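-- pv_equiv track=rewrite | github.com/ltyiz07/jump_2 | kakao_test/test_1.py | solution
-- ===== SOURCE A (Python) =====
-- def solution(new_id):
--     answer = ''
--     case_folded = new_id.casefold()
--     for i, w in enumerate(case_folded):
--         if 96 < ord(w) and ord(w) < 123:
--             answer += w
--         elif 47< ord(w) and ord(w) < 58:
--             answer += w
--         elif ord(w) == 45 or ord(w) == 95 or ord(w) == 46:
--             answer += w
--     while '..'in(answer):
--         answer = answer.replace('..', '.')
--
--     answer = answer.strip('.')
--     if not answer:
--         return 'aaa'
--     answer = answer[:15]
--     answer = answer.strip('.')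
--     while len(answer) < 3:
--         answer += answer[-1]
--     return answer
-- ===== SOURCE B (Python) =====
-- def solution(new_id):
--     # Single pass: filter + lowercase + dot-run collapse + leading-dot drop all at once.
--     out = []
--     for ch in new_id.casefold():
--         if ch.isalnum() or ch in '-_':
--             out.append(ch)
--         elif ch == '.' and out and out[-1] != '.':
--             out.append(ch)
--     if out and out[-1] == '.':
--         out.pop()
--     if not out:
--         return 'aaa'
--     s = ''.join(out[:15])
--     if s.endswith('.'):
--         s = s[:-1]
--     return s if len(s) >= 3 else (s + s[-1] * 3)[:3]
-- ===== Notes on version B (the rewrite author's own statement) =====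
-- stated objective: faster
-- what changed: Replaced A's three separate passes (character-filter loop, repeated whole-string double-dot replacement until fixpoint, strips) by one left-to-right fold that filters, lowercases, collapses dot runs and drops leading dots in a single pass, followed by constant-time end fix-ups.
import Mathlib
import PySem

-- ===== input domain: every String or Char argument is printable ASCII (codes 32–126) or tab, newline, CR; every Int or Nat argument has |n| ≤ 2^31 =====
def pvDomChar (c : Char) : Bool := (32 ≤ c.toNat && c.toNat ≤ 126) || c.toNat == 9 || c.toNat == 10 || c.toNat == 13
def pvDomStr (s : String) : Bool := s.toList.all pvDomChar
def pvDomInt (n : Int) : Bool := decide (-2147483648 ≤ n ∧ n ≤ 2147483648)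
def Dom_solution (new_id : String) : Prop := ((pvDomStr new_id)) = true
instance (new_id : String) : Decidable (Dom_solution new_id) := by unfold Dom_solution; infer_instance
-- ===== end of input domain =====

-- B replaces A's multi-pass sanitizer (filter loop + repeated double-dot replacement + strips) by one
-- single-pass fold that filters, collapses dot runs and drops leading dots at once (objective: faster).

-- ===== PORT A =====
-- `rep` and the `hasDD`/length lemmas below are cited by name in solCollapse's decreasing_by
-- (they justify termination of A's while-loop); `rep` mirrors one pass of s.replace('..','.').
def rep : List Char → List Char
  | [] => []
  | c :: t =>
    if c = '.' ∧ t.head? = some '.' then '.' :: rep t.tail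
    else c :: rep t
termination_by s => s.length
decreasing_by all_goals simp_all [List.length_tail]

theorem replace_go_eq (fuel : Nat) : ∀ (l acc : List Char), l.length ≤ fuel →
    PySem.Chars.replace.go ['.', '.'] ['.'] fuel l acc = acc.reverse ++ rep l := by
  induction fuel with
  | zero =>
    intro l acc h
    have : l = [] := by cases l <;> simp_all
    subst this
    simp [PySem.Chars.replace.go, rep]
  | succ n ih =>
    intro l acc h
    match l with
    | [] => simp [PySem.Chars.replace.go, rep]
    | c :: t =>
      rw [PySem.Chars.replace.go]
      by_cases hp : List.isPrefixOf ['.', '.'] (c :: t) = true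
      · simp only [hp, if_pos]
        have hc : c = '.' ∧ ∃ t', t = '.' :: t' := by
          cases t with
          | nil => simp [List.isPrefixOf] at hp
          | cons d t' =>
            simp [List.isPrefixOf] at hp
            exact ⟨hp.1.symm, t', by rw [hp.2.symm]⟩
        obtain ⟨rfl, t', rfl⟩ := hc
        simp only [List.length_cons, List.drop_succ_cons, List.drop_zero, List.length_nil]
        rw [ih t' (['.'].reverse ++ acc) (by simp at h ⊢; omega)]
        rw [rep]
        simp
      · simp only [hp, if_neg, Bool.false_eq_true, not_false_iff]
        rw [ih t (c :: acc) (by simp at h ⊢; omega)]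
        rw [rep]
        have : ¬ (c = '.' ∧ t.head? = some '.') := by
          intro ⟨h1, h2⟩
          apply hp
          cases t with
          | nil => simp at h2
          | cons d t' => simp at h2; simp [List.isPrefixOf, h1, h2]
        simp [this]

theorem replace_eq_rep (s : List Char) :
    PySem.Chars.replace s ['.', '.'] ['.'] = rep s := by
  rw [PySem.Chars.replace]
  simp [replace_go_eq s.length s [] le_rfl]

def hasDD : List Char → Bool
  | [] => false
  | c :: t => (decide (c = '.') && decide (t.head? = some '.')) || hasDD t

theorem infix_iff_hasDD (s : List Char) : ['.', '.'] <:+: s ↔ hasDD s = true := by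
  induction s with
  | nil => simp [hasDD]
  | cons c t ih =>
    rw [List.infix_cons_iff, hasDD]
    constructor
    · rintro (h | h)
      · cases t with
        | nil => exact absurd h.length_le (by simp)
        | cons d t' =>
          rw [List.cons_prefix_cons] at h
          obtain ⟨rfl, h⟩ := h
          rw [List.cons_prefix_cons] at h
          simp [h.1.symm]
      · simp [ih.mp h]
    · intro h
      simp only [Bool.or_eq_true, Bool.and_eq_true, decide_eq_true_eq] at h
      rcases h with ⟨rfl, h⟩ | h
      · left
        cases t with
        | nil => simp at h
        | cons d t' => simp at h; simp [h, List.cons_prefix_cons]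
      · right; exact ih.mpr h

theorem isIn_eq_hasDD (s : List Char) : PySem.Chars.isIn ['.', '.'] s = hasDD s := by
  by_cases h : hasDD s = true
  · rw [h, (PySem.Chars.isIn_iff_infix _ _).mpr ((infix_iff_hasDD s).mpr h)]
  · simp only [Bool.not_eq_true] at h
    rw [h, PySem.Chars.isIn_eq_false_iff]
    rw [infix_iff_hasDD, h]
    simp

theorem rep_length_le (s : List Char) : (rep s).length ≤ s.length := by
  fun_induction rep with
  | case1 => simp
  | case2 c t h ih =>
    cases t with
    | nil => simp_all
    | cons d t' => simp_all; omega
  | case3 c t h ih => simp; omega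

theorem rep_length_lt (s : List Char) (h : PySem.Chars.isIn ['.', '.'] s = true) :
    (rep s).length < s.length := by
  rw [isIn_eq_hasDD] at h
  fun_induction rep with
  | case1 => simp [hasDD] at h
  | case2 c t hc ih =>
    have := rep_length_le t.tail
    obtain ⟨rfl, hh⟩ := hc
    cases t with
    | nil => simp at hh
    | cons d t' => simp only [List.tail_cons, List.length_cons] at *; omega
  | case3 c t hc ih =>
    rw [hasDD] at h
    simp only [Bool.or_eq_true, Bool.and_eq_true, decide_eq_true_eq] at h
    rcases h with ⟨rfl, hh⟩ | h
    · exact absurd ⟨rfl, hh⟩ hc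
    · have := ih h
      simp; omega

-- A's `while '..' in answer: answer = answer.replace('..', '.')`
def solCollapse (s : List Char) : List Char :=
  if PySem.Chars.isIn ['.', '.'] s then
    solCollapse (PySem.Chars.replace s ['.', '.'] ['.'])
  else s
termination_by s.length
decreasing_by
  rename_i h
  rw [replace_eq_rep]
  exact rep_length_lt _ h

-- A's final `while len(answer) < 3: answer += answer[-1]`
def padLoop (s : List Char) : List Char :=
  if s.length < 3 then
    match PySem.List.pyGet? s (-1) with
    | some c => padLoop (s ++ [c])   -- answer[-1] (nonempty whenever reached)
    | none => s                      -- unreachable guard (Python would raise IndexError)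
  else s
termination_by 3 - s.length
decreasing_by simp; omega

-- literal transliteration of A on code points (casefold = lower: exact on the ASCII Dom)
def solutionCore (L : List Char) : List Char :=
  let case_folded := PySem.Chars.lower L
  let answer := (PySem.List.enumerate case_folded).foldl (fun answer iw =>
    let w := iw.2
    if 96 < w.toNat ∧ w.toNat < 123 then answer ++ [w]
    else if 47 < w.toNat ∧ w.toNat < 58 then answer ++ [w]
    else if w.toNat = 45 ∨ w.toNat = 95 ∨ w.toNat = 46 then answer ++ [w]
    else answer) []
  let answer := solCollapse answer
  let answer := PySem.Chars.stripChars answer ['.']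
  if answer = [] then ['a', 'a', 'a']
  else
    let answer := PySem.Chars.slice answer none (some 15)
    let answer := PySem.Chars.stripChars answer ['.']
    padLoop answer

def solution (new_id : String) : String := String.ofList (solutionCore new_id.toList)

-- ===== PORT B =====
-- literal transliteration of Source B on code points (casefold = lower: exact on the ASCII Dom)
def altCore (L : List Char) : List Char :=
  let out := (PySem.Chars.lower L).foldl (fun out ch =>
    if PySem.Chars.isalnum ch || (ch == '-' || ch == '_') then out ++ [ch]
    else if ch = '.' ∧ out ≠ [] ∧ out.getLast? ≠ some '.' then out ++ [ch]
    else out) []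
  let out := if out ≠ [] ∧ out.getLast? = some '.' then out.dropLast else out
  if out = [] then ['a', 'a', 'a']
  else
    let s := PySem.List.slice out none (some 15)
    let s := if PySem.Chars.endswith s ['.'] then PySem.Chars.slice s none (some (-1)) else s
    if 3 ≤ s.length then s
    else (s ++ List.replicate 3 (s.getLast?.getD 'a')).take 3   -- (s + s[-1]*3)[:3], s nonempty

def solution_alt (new_id : String) : String := String.ofList (altCore new_id.toList)

-- ===== PRECONDITION & SPEC =====
def Spec_solution (new_id : String) (out : String) : Prop := out = solution_alt new_id
instance (new_id : String) (out : String) : Decidable (Spec_solution new_id out) := by unfold Spec_solution; infer_instance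

-- ===== CLAIM (what is proved, stated in full; the proofs are below) =====
def Claim_equal_solution : Prop := ∀ (new_id : String), Dom_solution new_id → Spec_solution new_id (solution new_id)

-- ===== LEMMAS AND PROOFS =====

def dRun : List Char → Bool → List Char
  | [], _ => []
  | c :: t, f => if c = '.' then (if f then dRun t true else '.' :: dRun t true) else c :: dRun t false

def dropLead1 (s : List Char) : List Char := if s.head? = some '.' then s.tail else s
def dropTrail1 (s : List Char) : List Char := if s.getLast? = some '.' then s.dropLast else s

theorem dRun_rep (s : List Char) : ∀ f, dRun (rep s) f = dRun s f := by
  fun_induction rep s with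
  | case1 => intro f; rfl
  | case2 c t hc ih =>
    obtain ⟨rfl, hh⟩ := hc
    cases t with
    | nil => simp at hh
    | cons d t' =>
      simp at hh; subst hh
      intro f
      simp only [List.tail_cons] at ih ⊢
      cases f <;> simp [dRun, ih]
  | case3 c t hc ih =>
    intro f
    by_cases hcc : c = '.'
    · subst hcc
      cases f <;> simp [dRun, ih]
    · cases f <;> simp [dRun, hcc, ih]

theorem dRun_spec (s : List Char) :
    (∀ f, hasDD (dRun s f) = false) ∧ (dRun s true).head? ≠ some '.' := by
  induction s with
  | nil => simp [dRun, hasDD]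
  | cons c t ih =>
    by_cases hc : c = '.'
    · subst hc
      refine ⟨?_, by simp [dRun, ih.2]⟩
      intro f
      cases f
      · simp only [dRun, if_neg Bool.false_ne_true]
        simp [hasDD, ih.1, ih.2]
      · simp [dRun, ih.1]
    · refine ⟨?_, by simp [dRun, hc]⟩
      intro f
      simp [dRun, hc, hasDD, ih.1]

theorem dRun_id (s : List Char) (h : hasDD s = false) :
    dRun s false = s ∧ dRun s true = dropLead1 s := by
  induction s with
  | nil => simp [dRun, dropLead1]
  | cons c t ih =>
    rw [hasDD] at h
    simp only [Bool.or_eq_false_iff, Bool.and_eq_false_iff] at h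
    obtain ⟨h1, h2⟩ := h
    have iht := ih h2
    by_cases hc : c = '.'
    · subst hc
      have hhd : t.head? ≠ some '.' := by
        rcases h1 with h1 | h1
        · simp at h1
        · simpa using h1
      have : dRun t true = t := by
        rw [iht.2, dropLead1, if_neg hhd]
      constructor
      · simp [dRun, this]
      · simp [dRun, this, dropLead1]
    · constructor
      · simp [dRun, hc, iht.1]
      · simp [dRun, hc, iht.1, dropLead1]

theorem dRun_true_eq (s : List Char) : dRun s true = dropLead1 (dRun s false) := by
  cases s with
  | nil => rfl
  | cons c t =>
    by_cases hc : c = '.'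
    · subst hc; simp [dRun, dropLead1]
    · simp [dRun, hc, dropLead1]

theorem collapse_eq_dRun (s : List Char) : solCollapse s = dRun s false := by
  fun_induction solCollapse s with
  | case1 s h ih =>
    rw [ih, replace_eq_rep, dRun_rep]
  | case2 s h =>
    simp only [Bool.not_eq_true, isIn_eq_hasDD] at h
    exact (dRun_id s h).1.symm

theorem hasDD_infix {t s : List Char} (hi : t <:+: s) (hs : hasDD s = false) : hasDD t = false := by
  by_contra h
  simp only [Bool.not_eq_false] at h
  have := (infix_iff_hasDD t).mpr h
  have := (infix_iff_hasDD s).mp (this.trans hi)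
  simp [this] at hs

theorem hasDD_reverse (s : List Char) : hasDD s.reverse = hasDD s := by
  by_cases h : hasDD s = true
  · rw [h]
    rw [← infix_iff_hasDD]
    have : (['.', '.'] : List Char).reverse <:+: s.reverse := List.reverse_infix.mpr ((infix_iff_hasDD s).mpr h)
    simpa using this
  · simp only [Bool.not_eq_true] at h
    rw [h, ← Bool.not_eq_true, ← infix_iff_hasDD]
    intro hinf
    have : (['.', '.'] : List Char).reverse <:+: s := by simpa using List.reverse_infix.mpr hinf
    simp at this
    rw [infix_iff_hasDD, h] at this
    simp at this

theorem dropWhile_noDD (s : List Char) (h : hasDD s = false) :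
    List.dropWhile (fun c => (['.'] : List Char).contains c) s = dropLead1 s := by
  cases s with
  | nil => rfl
  | cons c t =>
    by_cases hc : c = '.'
    · subst hc
      rw [hasDD] at h
      simp only [Bool.or_eq_false_iff, Bool.and_eq_false_iff] at h
      have hhd : t.head? ≠ some '.' := by
        rcases h.1 with h1 | h1
        · simp at h1
        · simpa using h1
      cases t with
      | nil => simp [List.dropWhile, dropLead1]
      | cons d t' =>
        simp only [List.head?_cons, ne_eq, Option.some.injEq] at hhd
        simp [List.dropWhile, dropLead1, hhd]
    · simp [List.dropWhile, hc, dropLead1]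

theorem revDropLead (Y : List Char) : (dropLead1 Y.reverse).reverse = dropTrail1 Y := by
  rcases List.eq_nil_or_concat Y with rfl | ⟨ys, c, rfl⟩
  · rfl
  · by_cases hc : c = '.'
    · subst hc
      simp [dropLead1, dropTrail1]
    · simp [dropLead1, dropTrail1, hc]

theorem strip_eq (X : List Char) (h : hasDD X = false) :
    PySem.Chars.stripChars X ['.'] = dropTrail1 (dropLead1 X) := by
  rw [PySem.Chars.stripChars]
  have hY : hasDD (dropLead1 X) = false := by
    apply hasDD_infix _ h
    unfold dropLead1
    split
    · exact (List.tail_suffix X).isInfix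
    · exact List.infix_rfl
  rw [dropWhile_noDD X h]
  rw [dropWhile_noDD _ (by rw [hasDD_reverse]; exact hY)]
  exact revDropLead _

def keepA (c : Char) : Bool :=
  (decide (96 < c.toNat) && decide (c.toNat < 123)) ||
  (decide (47 < c.toNat) && decide (c.toNat < 58)) ||
  (decide (c.toNat = 45) || decide (c.toNat = 95) || decide (c.toNat = 46))

def keepB (c : Char) : Bool := PySem.Chars.isalnum c || (c == '-' || c == '_')

theorem foldA_eq (l : List Char) : ∀ (start : Int) (acc : List Char),
    (PySem.List.enumerate l start).foldl (fun answer iw =>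
      let w := iw.2
      if 96 < w.toNat ∧ w.toNat < 123 then answer ++ [w]
      else if 47 < w.toNat ∧ w.toNat < 58 then answer ++ [w]
      else if w.toNat = 45 ∨ w.toNat = 95 ∨ w.toNat = 46 then answer ++ [w]
      else answer) acc = acc ++ l.filter keepA := by
  induction l with
  | nil => intro start acc; simp [PySem.List.enumerate]
  | cons c t ih =>
    intro start acc
    rw [PySem.List.enumerate, List.foldl_cons, List.filter_cons]
    by_cases hk : keepA c = true
    · have : (if 96 < c.toNat ∧ c.toNat < 123 then acc ++ [c]
        else if 47 < c.toNat ∧ c.toNat < 58 then acc ++ [c]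
        else if c.toNat = 45 ∨ c.toNat = 95 ∨ c.toNat = 46 then acc ++ [c]
        else acc) = acc ++ [c] := by
        unfold keepA at hk; split_ifs <;> simp_all <;> omega
      simp only [this, ih, hk, if_pos]
      simp
    · have : (if 96 < c.toNat ∧ c.toNat < 123 then acc ++ [c]
        else if 47 < c.toNat ∧ c.toNat < 58 then acc ++ [c]
        else if c.toNat = 45 ∨ c.toNat = 95 ∨ c.toNat = 46 then acc ++ [c]
        else acc) = acc := by
        unfold keepA at hk; split_ifs <;> simp_all
      simp only [this, ih]
      simp [hk]

def bRun : List Char → Bool → List Char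
  | [], _ => []
  | c :: t, f =>
    if keepB c then c :: bRun t false
    else if c = '.' ∧ f = false then '.' :: bRun t true
    else bRun t f

theorem keepB_ne_dot {c : Char} (h : keepB c = true) : c ≠ '.' := by
  rintro rfl
  revert h; decide

theorem foldB_eq (l : List Char) : ∀ (out : List Char),
    l.foldl (fun out ch =>
      if PySem.Chars.isalnum ch || (ch == '-' || ch == '_') then out ++ [ch]
      else if ch = '.' ∧ out ≠ [] ∧ out.getLast? ≠ some '.' then out ++ [ch]
      else out) out
    = out ++ bRun l (decide (out = []) || decide (out.getLast? = some '.')) := by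
  induction l with
  | nil => intro out; simp [bRun]
  | cons c t ih =>
    intro out
    rw [List.foldl_cons, bRun]
    by_cases hk : keepB c = true
    · rw [show (PySem.Chars.isalnum c || (c == '-' || c == '_')) = true from hk]
      simp only [if_pos]
      rw [ih (out ++ [c])]
      have : (decide (out ++ [c] = []) || decide ((out ++ [c]).getLast? = some '.')) = false := by
        simp [keepB_ne_dot hk]
      rw [this, if_pos hk]
      simp
    · have hk' : keepB c = false := by simpa using hk
      rw [show (PySem.Chars.isalnum c || (c == '-' || c == '_')) = keepB c from rfl, hk']
      simp only [Bool.false_eq_true, if_false]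
      by_cases hd : c = '.' ∧ out ≠ [] ∧ out.getLast? ≠ some '.'
      · rw [if_pos hd, ih (out ++ [c])]
        obtain ⟨rfl, h1, h2⟩ := hd
        have hf : (decide (out = []) || decide (out.getLast? = some '.')) = false := by
          simp [h1, h2]
        rw [hf]
        simp
      · rw [if_neg hd, ih out]
        by_cases hdot : c = '.' ∧ (decide (out = []) || decide (out.getLast? = some '.')) = false
        · exfalso
          apply hd
          have h2 := hdot.2
          simp only [Bool.or_eq_false_iff, decide_eq_false_iff_not] at h2
          exact ⟨hdot.1, h2.1, h2.2⟩
        · rw [if_neg hdot]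

theorem char_le_iff (a b : Char) : (a ≤ b) ↔ (a.toNat ≤ b.toNat) := by
  rw [Char.le_def, UInt32.le_iff_toNat_le]; rfl

theorem char_eq_iff (a b : Char) : (a = b) ↔ (a.toNat = b.toNat) := by
  constructor
  · rintro rfl; rfl
  · intro hh; exact Char.ext (UInt32.toNat_inj.mp hh)

theorem keepA_eq_keepB {c : Char} (h : PySem.Chars.isupper c = false) :
    keepA c = (keepB c || decide (c = '.')) := by
  have hA : ¬(65 ≤ c.toNat ∧ c.toNat ≤ 90) := by
    intro hh
    rw [PySem.Chars.isupper] at h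
    simp only [Bool.and_eq_false_iff, decide_eq_false_iff_not, char_le_iff] at h
    have e1 : ('A':Char).toNat = 65 := by decide
    have e2 : ('Z':Char).toNat = 90 := by decide
    rw [e1, e2] at h
    omega
  rw [Bool.eq_iff_iff]
  simp only [keepA, keepB, PySem.Chars.isalnum, PySem.Chars.isalpha, PySem.Chars.isdigit,
    PySem.Chars.isupper, PySem.Chars.islower]
  simp only [Bool.or_eq_true, Bool.and_eq_true, decide_eq_true_eq, beq_iff_eq,
    char_le_iff, char_eq_iff]
  have e1 : ('A':Char).toNat = 65 := by decide
  have e2 : ('Z':Char).toNat = 90 := by decide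
  have e3 : ('a':Char).toNat = 97 := by decide
  have e4 : ('z':Char).toNat = 122 := by decide
  have e5 : ('0':Char).toNat = 48 := by decide
  have e6 : ('9':Char).toNat = 57 := by decide
  have e7 : ('-':Char).toNat = 45 := by decide
  have e8 : ('_':Char).toNat = 95 := by decide
  have e9 : ('.':Char).toNat = 46 := by decide
  rw [e1, e2, e3, e4, e5, e6, e7, e8, e9]
  omega

theorem bRun_eq_dRun (l : List Char) (hl : ∀ c ∈ l, PySem.Chars.isupper c = false) :
    ∀ f, bRun l f = dRun (l.filter keepA) f := by
  induction l with
  | nil => intro f; simp [bRun, dRun]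
  | cons c t ih =>
    intro f
    have hc := keepA_eq_keepB (hl c List.mem_cons_self)
    have iht := ih (fun x hx => hl x (List.mem_cons_of_mem _ hx))
    rw [bRun, List.filter_cons]
    by_cases hk : keepB c = true
    · have : keepA c = true := by rw [hc, hk]; simp
      rw [if_pos hk, this, if_pos rfl]
      rw [dRun]
      rw [if_neg (keepB_ne_dot hk)]
      simp [iht]
    · have hk' : keepB c = false := by simpa using hk
      rw [if_neg hk]
      by_cases hdot : c = '.'
      · subst hdot
        have : keepA '.' = true := by decide
        rw [this, if_pos rfl, dRun, if_pos rfl]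
        by_cases hf : f = false
        · subst hf; simp [iht]
        · have : f = true := by simpa using hf
          subst this
          simp [iht]
      · have : keepA c = false := by rw [hc, hk']; simp [hdot]
        rw [this]
        simp only [Bool.false_eq_true, if_false]
        rw [if_neg (by rintro ⟨h1, _⟩; exact hdot h1)]
        exact iht f

theorem isupper_lower (L : List Char) : ∀ c ∈ PySem.Chars.lower L, PySem.Chars.isupper c = false := by
  intro c hc
  rw [PySem.Chars.lower] at hc
  obtain ⟨d, _, rfl⟩ := List.mem_map.mp hc
  rw [PySem.Chars.lowerChar]
  by_cases hu : PySem.Chars.isupper d = true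
  · rw [if_pos hu]
    rw [PySem.Chars.isupper] at hu ⊢
    simp only [Bool.and_eq_true, decide_eq_true_eq, char_le_iff] at hu
    have e1 : ('A':Char).toNat = 65 := by decide
    have e2 : ('Z':Char).toNat = 90 := by decide
    rw [e1, e2] at hu
    have hv : (Char.ofNat (d.toNat + 32)).toNat = d.toNat + 32 := by
      rw [Char.toNat_ofNat, if_pos]
      constructor
      omega
    simp only [Bool.and_eq_false_iff, decide_eq_false_iff_not, char_le_iff, hv, e1, e2]
    omega
  · rw [if_neg hu]
    simpa using hu

theorem endswith_dot (s : List Char) : PySem.Chars.endswith s ['.'] = decide (s.getLast? = some '.') := by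
  rw [PySem.Chars.endswith]
  rcases List.eq_nil_or_concat s with rfl | ⟨ys, c, rfl⟩
  · simp
  · rw [Bool.eq_iff_iff, List.isSuffixOf_iff_suffix]
    simp only [List.suffix_concat_iff, List.concat_eq_append, List.getLast?_append,
      decide_eq_true_eq]
    constructor
    · rintro h
      rcases h with h0 | ⟨t, ht, _⟩
      · simp at h0
      have ht0 : t = [] := by
        cases t with
        | nil => rfl
        | cons a t2 =>
          have := congrArg List.length ht
          simp at this
      subst ht0
      simp at ht
      simp [← ht]
    · intro h
      simp at h
      exact Or.inr ⟨[], by simp [h], by simp⟩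


theorem infix_dropLead1 (Z : List Char) : dropLead1 Z <:+: Z := by
  unfold dropLead1
  split
  · exact (List.tail_suffix Z).isInfix
  · exact List.infix_rfl

theorem infix_dropTrail1 (Z : List Char) : dropTrail1 Z <:+: Z := by
  unfold dropTrail1
  split
  · exact (List.dropLast_prefix Z).isInfix
  · exact List.infix_rfl

theorem head?_dropTrail1 (Z : List Char) (h : Z.head? ≠ some '.') :
    (dropTrail1 Z).head? ≠ some '.' := by
  unfold dropTrail1
  split
  · cases Z with
    | nil => simp
    | cons a t =>
      cases t with
      | nil => simp
      | cons b t2 => simpa [List.dropLast_cons₂] using h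
  · exact h

theorem dropTrail1_ne_nil (Z : List Char) (hne : Z ≠ []) (hh : Z.head? ≠ some '.') :
    dropTrail1 Z ≠ [] := by
  unfold dropTrail1
  split
  · rename_i hlast
    cases Z with
    | nil => simp at hne
    | cons a t =>
      cases t with
      | nil =>
        simp at hlast
        simp [hlast] at hh
      | cons b t2 => simp [List.dropLast_cons₂]
  · exact hne

theorem slice15 (s : List Char) : PySem.List.slice s none (some 15) = s.take 15 := by
  have := PySem.List.slice_to s (b := 15) (by norm_num)
  simpa using this

theorem sliceNeg1 (s : List Char) : PySem.List.slice s none (some (-1)) = s.dropLast := by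
  simp [PySem.List.slice, List.dropLast_eq_take]

theorem padLoop_eq (T : List Char) (h : T ≠ []) :
    padLoop T = if 3 ≤ T.length then T
      else (T ++ List.replicate 3 (T.getLast?.getD 'a')).take 3 := by
  match T, h with
  | [a], _ =>
    rw [padLoop.eq_def]
    simp [PySem.List.pyGet?, PySem.List.pyIdx?]
    rw [padLoop.eq_def]
    simp [PySem.List.pyGet?, PySem.List.pyIdx?]
    rw [padLoop.eq_def]
    simp [PySem.List.pyGet?, PySem.List.pyIdx?]
  | [a, b], _ =>
    rw [padLoop.eq_def]
    simp [PySem.List.pyGet?, PySem.List.pyIdx?]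
    rw [padLoop.eq_def]
    simp [PySem.List.pyGet?, PySem.List.pyIdx?]
  | a :: b :: c :: t, _ =>
    rw [padLoop.eq_def]
    simp

theorem foldA0 (l : List Char) :
    (PySem.List.enumerate l).foldl (fun answer iw =>
      let w := iw.2
      if 96 < w.toNat ∧ w.toNat < 123 then answer ++ [w]
      else if 47 < w.toNat ∧ w.toNat < 58 then answer ++ [w]
      else if w.toNat = 45 ∨ w.toNat = 95 ∨ w.toNat = 46 then answer ++ [w]
      else answer) [] = l.filter keepA := by
  simpa using foldA_eq l 0 []

theorem foldB0 (l : List Char) :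
    l.foldl (fun out ch =>
      if PySem.Chars.isalnum ch || (ch == '-' || ch == '_') then out ++ [ch]
      else if ch = '.' ∧ out ≠ [] ∧ out.getLast? ≠ some '.' then out ++ [ch]
      else out) [] = bRun l true := by
  simpa using foldB_eq l []

theorem core_eq (L : List Char) : solutionCore L = altCore L := by
  unfold solutionCore altCore
  simp only [foldA0, foldB0, collapse_eq_dRun,
    bRun_eq_dRun (PySem.Chars.lower L) (isupper_lower L), dRun_true_eq]
  set F := (PySem.Chars.lower L).filter keepA with hF
  set X := dRun F false with hX
  have hXdd : hasDD X = false := (dRun_spec F).1 false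
  have hhead : (dropLead1 X).head? ≠ some '.' := by
    rw [hX, ← dRun_true_eq]
    exact (dRun_spec F).2
  -- B's pop step is dropTrail1
  have hpop : (if dropLead1 X ≠ [] ∧ (dropLead1 X).getLast? = some '.'
      then (dropLead1 X).dropLast else dropLead1 X) = dropTrail1 (dropLead1 X) := by
    unfold dropTrail1
    by_cases hl : (dropLead1 X).getLast? = some '.'
    · rw [if_pos ⟨by intro hnil; rw [hnil] at hl; simp at hl, hl⟩, if_pos hl]
    · rw [if_neg (by rintro ⟨_, hh⟩; exact hl hh), if_neg hl]
  rw [hpop, strip_eq X hXdd]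
  set S := dropTrail1 (dropLead1 X) with hS
  have hShead : S.head? ≠ some '.' := head?_dropTrail1 _ hhead
  have hSdd : hasDD S = false :=
    hasDD_infix ((infix_dropTrail1 _).trans (infix_dropLead1 _)) hXdd
  by_cases hSe : S = []
  · rw [if_pos hSe, if_pos hSe]
  · rw [if_neg hSe, if_neg hSe]
    have hT0 : PySem.Chars.slice S none (some 15) = S.take 15 := by
      rw [PySem.Chars.slice_eq_listSlice, slice15]
    rw [hT0, slice15]
    set T0 := S.take 15 with hT0d
    obtain ⟨a, t, hSc⟩ := List.exists_cons_of_ne_nil hSe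
    have hT0c : T0 = a :: t.take 14 := by rw [hT0d, hSc]; simp
    have hT0ne : T0 ≠ [] := by rw [hT0c]; simp
    have hT0head : T0.head? ≠ some '.' := by
      rw [hT0c]
      rw [hSc] at hShead
      simpa using hShead
    have hT0dd : hasDD T0 = false := hasDD_infix (List.take_prefix _ _).isInfix hSdd
    have hstrip2 : PySem.Chars.stripChars T0 ['.'] = dropTrail1 T0 := by
      rw [strip_eq T0 hT0dd]
      rw [show dropLead1 T0 = T0 from by unfold dropLead1; rw [if_neg hT0head]]
    rw [hstrip2]
    have hB2 : (if PySem.Chars.endswith T0 ['.'] then PySem.Chars.slice T0 none (some (-1)) else T0)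
        = dropTrail1 T0 := by
      rw [endswith_dot, PySem.Chars.slice_eq_listSlice, sliceNeg1]
      unfold dropTrail1
      by_cases hl : T0.getLast? = some '.'
      · rw [if_pos (by simp [hl]), if_pos hl]
      · rw [if_neg (by simp [hl]), if_neg hl]
    rw [hB2]
    exact padLoop_eq _ (dropTrail1_ne_nil _ hT0ne hT0head)

-- ===== VERDICT (by name: the statement is the Claim_ definition above) =====
theorem solution_spec : Claim_equal_solution := by
  intro new_id _
  unfold Spec_solution solution solution_alt
  rw [core_eq]
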